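-- pv_equiv track=rewrite | github.com/joshcrow/greenhouse-beach | scripts/backfill_riddle_scores.py | extract_guess_text
-- ===== SOURCE A (Python) =====
-- def extract_guess_text(body: str) -> str:
--     if not body:
--         return ""
--     for marker in ["\nOn ", "\n>", "\n--", "\nSent from", "\n___"]:
--         if marker in body:
--             body = body.split(marker)[0]
--     lines = [l.strip() for l in body.strip().split("\n") if l.strip()]
--     return " ".join(lines)[:200].strip()
-- ===== SOURCE B (Python) =====
-- def extract_guess_text(body: str) -> str:
--     if not body:
--         return ""
--     markers = ["\nOn ", "\n>", "\n--", "\nSent from", "\n___"]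
--     positions = [body.find(m) for m in markers if m in body]
--     if positions:
--         body = body[:min(positions)]
--     lines = [l.strip() for l in body.strip().split("\n") if l.strip()]
--     return " ".join(lines)[:200].strip()
-- ===== Notes on version B (the rewrite author's own statement) =====
-- stated objective: alternative
-- what changed: The sequential marker loop that repeatedly re-splits and truncates the body is replaced by computing each present marker's first-occurrence index and cutting once at the minimum index with a single slice; the final whitespace normalization is unchanged.
import Mathlib
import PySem

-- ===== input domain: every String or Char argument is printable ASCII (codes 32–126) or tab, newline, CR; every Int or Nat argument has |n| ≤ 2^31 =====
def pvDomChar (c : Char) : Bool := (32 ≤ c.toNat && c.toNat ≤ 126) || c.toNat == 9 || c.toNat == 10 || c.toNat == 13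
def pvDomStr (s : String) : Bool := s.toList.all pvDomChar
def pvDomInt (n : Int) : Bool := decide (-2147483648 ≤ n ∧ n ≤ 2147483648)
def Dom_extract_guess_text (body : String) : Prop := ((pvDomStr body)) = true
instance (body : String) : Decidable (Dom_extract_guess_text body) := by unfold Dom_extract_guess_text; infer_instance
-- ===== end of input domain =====

-- B replaces A's sequential truncate-at-each-marker loop by one cut at the minimum
-- first-occurrence index of the present markers (objective: alternative decomposition).

-- the marker list both Pythons spell out literally
def pvMarkers : List (List Char) :=
  [['\n','O','n',' '], ['\n','>'], ['\n','-','-'],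
   ['\n','S','e','n','t',' ','f','r','o','m'], ['\n','_','_','_']]

-- ===== PORT A =====
-- literal port of A; body.split(marker)[0] is ported as .headD [] (split with a
-- nonempty separator never returns an empty list, so Python's [0] cannot raise)
def extract_guess_text (body : String) : String :=
  if body = "" then "" else
  let b := pvMarkers.foldl
    (fun b m => if PySem.Chars.isIn m b then (PySem.Chars.splitOn b m).headD [] else b)
    body.toList
  let lines := ((PySem.Chars.splitOn (PySem.Chars.strip b) ['\n']).map PySem.Chars.strip).filter
    (fun l => !l.isEmpty)
  String.ofList (PySem.Chars.strip (PySem.List.slice (PySem.Chars.join [' '] lines) none (some 200)))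

-- ===== PORT B =====
-- literal port of B: positions of present markers, one slice at their minimum
def extract_guess_text_alt (body : String) : String :=
  if body = "" then "" else
  let bl := body.toList
  let positions := (pvMarkers.filter (fun m => PySem.Chars.isIn m bl)).map
    (fun m => PySem.Chars.find bl m)
  let b := match PySem.List.min? positions (fun x => x) with
    | none => bl
    | some p => PySem.List.slice bl none (some p)
  let lines := ((PySem.Chars.splitOn (PySem.Chars.strip b) ['\n']).map PySem.Chars.strip).filter
    (fun l => !l.isEmpty)
  String.ofList (PySem.Chars.strip (PySem.List.slice (PySem.Chars.join [' '] lines) none (some 200)))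

-- ===== PRECONDITION & SPEC =====
def Spec_extract_guess_text (body : String) (out : String) : Prop := out = extract_guess_text_alt body
instance (body : String) (out : String) : Decidable (Spec_extract_guess_text body out) := by unfold Spec_extract_guess_text; infer_instance

-- ===== CLAIM (what is proved, stated in full; the proofs are below) =====
def Claim_equal_extract_guess_text : Prop := ∀ (body : String), Dom_extract_guess_text body → Spec_extract_guess_text body (extract_guess_text body)

-- ===== LEMMAS AND PROOFS =====

-- index of the first occurrence of sep in s (s.length if there is none)
def fIdx (sep : List Char) : List Char → Nat
  | [] => 0
  | c :: t => if sep.isPrefixOf (c :: t) then 0 else fIdx sep t + 1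

theorem fIdx_le (sep s : List Char) : fIdx sep s ≤ s.length := by
  induction s with
  | nil => simp [fIdx]
  | cons c t ih => simp only [fIdx, List.length_cons]; split <;> omega

theorem fIdx_le_of_prefixOf {sep : List Char} (hsep : sep ≠ []) :
    ∀ {s : List Char} {j : Nat}, sep.isPrefixOf (s.drop j) = true → fIdx sep s ≤ j := by
  intro s
  induction s with
  | nil =>
    intro j h
    simp only [List.drop_nil] at h
    exact absurd (List.prefix_nil.mp (List.isPrefixOf_iff_prefix.mp h)) hsep
  | cons c t ih =>
    intro j h
    cases j with
    | zero => simp only [List.drop_zero] at h; simp [fIdx, h]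
    | succ j =>
      simp only [fIdx]
      split
      · omega
      · have := ih (j := j) (by simpa using h); omega

theorem fIdx_prefixOf {sep s : List Char} (h : fIdx sep s < s.length) :
    sep.isPrefixOf (s.drop (fIdx sep s)) = true := by
  induction s with
  | nil => simp at h
  | cons c t ih =>
    by_cases hp : sep.isPrefixOf (c :: t)
    · simpa [fIdx, hp] using hp
    · simp only [fIdx, if_neg hp] at h ⊢
      simpa using ih (by simpa using h)

theorem findGo_eq {sub : List Char} (hsub : sub ≠ []) :
    ∀ (s : List Char) (k : Nat), PySem.Chars.find.go sub s k =
      if fIdx sub s < s.length then ((k : Int) + fIdx sub s) else -1 := by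
  intro s
  induction s with
  | nil => intro k; simp [PySem.Chars.find.go, fIdx, hsub]
  | cons c t ih =>
    intro k
    by_cases hp : sub.isPrefixOf (c :: t)
    · simp [PySem.Chars.find.go, fIdx, hp]
    · simp only [PySem.Chars.find.go, hp, Bool.false_eq_true, if_false, ih (k + 1),
        fIdx, List.length_cons]
      rcases Nat.lt_or_ge (fIdx sub t) t.length with h1 | h1
      · rw [if_pos h1, if_pos (by omega)]; push_cast; ring
      · rw [if_neg (by omega), if_neg (by omega)]

theorem find_eq {sub : List Char} (s : List Char) (hsub : sub ≠ []) :
    PySem.Chars.find s sub = if fIdx sub s < s.length then ((fIdx sub s : Nat) : Int) else -1 := by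
  simpa using findGo_eq hsub s 0

theorem isIn_iff_fIdx {sub : List Char} (s : List Char) (hsub : sub ≠ []) :
    PySem.Chars.isIn sub s = true ↔ fIdx sub s < s.length := by
  simp only [PySem.Chars.isIn, find_eq s hsub, bne_iff_ne]
  split_ifs with h
  · simp only [iff_true_intro h, iff_true]; omega
  · simp [h]

theorem rev_headD {α : Type} (x a : α) (acc : List α) (d : α) :
    ((x :: a :: acc).reverse).headD d = acc.getLastD a := by
  simp [List.headD_eq_head?, List.head?_reverse, List.getLast?_cons, List.getLastD_eq_getLast?]

theorem splitGo_last {sep : List Char} :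
    ∀ (fuel : Nat) (s cur a : List Char) (acc : List (List Char)),
      (PySem.Chars.splitOn.go sep fuel s cur (a :: acc)).headD [] = acc.getLastD a := by
  intro fuel
  induction fuel with
  | zero => intro s cur a acc; simpa [PySem.Chars.splitOn.go] using rev_headD _ a acc []
  | succ fuel ih =>
    intro s cur a acc
    cases s with
    | nil => simpa [PySem.Chars.splitOn.go] using rev_headD _ a acc []
    | cons c rest =>
      by_cases hp : sep.isPrefixOf (c :: rest)
      · simp only [PySem.Chars.splitOn.go, hp, if_true]
        rw [ih]
        simp [← List.getLastD_eq_getLast?, List.getLastD_cons]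
      · simp only [PySem.Chars.splitOn.go, hp, Bool.false_eq_true, if_false]
        exact ih _ _ _ _

theorem splitGo_head {sep : List Char} (hsep : sep ≠ []) :
    ∀ (fuel : Nat) (s cur : List Char), s.length < fuel →
      (PySem.Chars.splitOn.go sep fuel s cur []).headD [] = cur.reverse ++ s.take (fIdx sep s) := by
  intro fuel
  induction fuel with
  | zero => intro s cur h; omega
  | succ fuel ih =>
    intro s cur h
    cases s with
    | nil => simp [PySem.Chars.splitOn.go, fIdx]
    | cons c rest =>
      by_cases hp : sep.isPrefixOf (c :: rest)
      · simp only [PySem.Chars.splitOn.go, hp, if_true]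
        rw [splitGo_last]
        simp [fIdx, hp]
      · simp only [PySem.Chars.splitOn.go, hp, Bool.false_eq_true, if_false]
        rw [ih rest (c :: cur) (by simpa using Nat.lt_of_succ_lt_succ h)]
        simp [fIdx, hp, List.take_succ_cons]

theorem splitOn_headD {sep : List Char} (s : List Char) (hsep : sep ≠ []) :
    (PySem.Chars.splitOn s sep).headD [] = s.take (fIdx sep s) := by
  simpa using splitGo_head hsep (s.length + 1) s [] (by omega)

-- markers all start with '\n' and contain no further '\n'
def goodM (m : List Char) : Prop := m ≠ [] ∧ m.headI = '\n' ∧ '\n' ∉ m.tail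

theorem prefixOf_of_take_drop {m b : List Char} {k j : Nat}
    (h : m.isPrefixOf ((b.take k).drop j) = true) : m.isPrefixOf (b.drop j) = true := by
  rw [List.isPrefixOf_iff_prefix] at h ⊢
  rw [List.drop_take] at h
  exact h.trans (List.take_prefix _ _)

-- a marker occurrence cannot straddle a cut that sits on a '\n'
theorem fIdx_take_min {b : List Char} {k : Nat} (hk : k < b.length) (hnl : b[k] = '\n')
    {m : List Char} (hm : goodM m) {n : Nat} (hn : n ≤ k) :
    min n (fIdx m (b.take k)) = min n (fIdx m b) := by
  obtain ⟨hne, hhead, htail⟩ := hm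
  have hlen' : (b.take k).length = k := by simp [le_of_lt hk]
  by_cases hib : fIdx m b < b.length
  · have hp : m.isPrefixOf (b.drop (fIdx m b)) = true := fIdx_prefixOf hib
    have hmlen : 0 < m.length := List.length_pos_iff.mpr hne
    by_cases hfit : fIdx m b + m.length ≤ k
    · -- the first occurrence fits inside the prefix: same first index
      have hpt : m.isPrefixOf ((b.take k).drop (fIdx m b)) = true := by
        rw [List.isPrefixOf_iff_prefix, List.drop_take]
        exact List.prefix_take_iff.mpr ⟨List.isPrefixOf_iff_prefix.mp hp, by omega⟩
      have h1 : fIdx m (b.take k) ≤ fIdx m b := fIdx_le_of_prefixOf hne hpt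
      have h2 : fIdx m b ≤ fIdx m (b.take k) := by
        have hlt : fIdx m (b.take k) < (b.take k).length := by omega
        exact fIdx_le_of_prefixOf hne (prefixOf_of_take_drop (fIdx_prefixOf hlt))
      rw [le_antisymm h1 h2]
    · by_cases hik : k ≤ fIdx m b
      · -- first occurrence at or after the cut: prefix has none
        have hnone : ¬ fIdx m (b.take k) < (b.take k).length := by
          intro hlt
          have := fIdx_le_of_prefixOf hne (prefixOf_of_take_drop (fIdx_prefixOf hlt))
          omega
        have := fIdx_le m (b.take k)
        omega
      · -- straddling occurrence: impossible, the cut char is '\n'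
        exfalso
        have hd : k - fIdx m b < m.length := by omega
        have hgd := (List.isPrefixOf_iff_prefix.mp hp).getElem hd
        rw [List.getElem_drop] at hgd
        have hknl : m[k - fIdx m b] = '\n' := by
          rw [hgd]
          have : fIdx m b + (k - fIdx m b) = k := by omega
          simp_rw [this]; exact hnl
        have hmem : m[k - fIdx m b] ∈ m.tail := by
          rw [← List.drop_one]
          have h1 : k - fIdx m b - 1 < (m.drop 1).length := by simp; omega
          have : (m.drop 1)[k - fIdx m b - 1] = m[k - fIdx m b] := by
            rw [List.getElem_drop]
            congr 1
            omega
          rw [← this]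
          exact List.getElem_mem h1
        rw [hknl] at hmem
        exact htail hmem
  · -- no occurrence at all: none in the prefix either
    have hnone : ¬ fIdx m (b.take k) < (b.take k).length := by
      intro hlt
      have := fIdx_le_of_prefixOf hne (prefixOf_of_take_drop (fIdx_prefixOf hlt))
      omega
    have h1 := fIdx_le m (b.take k)
    have h2 := fIdx_le m b
    omega

theorem minfold_le (f : List Char → Nat) :
    ∀ (ms : List (List Char)) (n : Nat), ms.foldl (fun n m => min n (f m)) n ≤ n := by
  intro ms
  induction ms with
  | nil => intro n; simp
  | cons m ms ih => intro n; exact le_trans (ih _) (min_le_left _ _)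

theorem foldl_min_take_congr {b : List Char} {k : Nat} (hk : k < b.length) (hnl : b[k] = '\n') :
    ∀ (ms : List (List Char)) (n : Nat), n ≤ k → (∀ m ∈ ms, goodM m) →
      ms.foldl (fun n m => min n (fIdx m (b.take k))) n
        = ms.foldl (fun n m => min n (fIdx m b)) n := by
  intro ms
  induction ms with
  | nil => intro n _ _; rfl
  | cons m ms ih =>
    intro n hn hg
    simp only [List.foldl_cons]
    rw [fIdx_take_min hk hnl (hg m (List.mem_cons_self)) hn]
    exact ih _ (le_trans (min_le_left _ _) hn) (fun m' hm' => hg m' (List.mem_cons_of_mem _ hm'))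

theorem seqcut_eq :
    ∀ (ms : List (List Char)) (b : List Char), (∀ m ∈ ms, goodM m) →
      ms.foldl (fun b m => b.take (fIdx m b)) b
        = b.take (ms.foldl (fun n m => min n (fIdx m b)) b.length) := by
  intro ms
  induction ms with
  | nil => intro b _; simp
  | cons m ms ih =>
    intro b hg
    have hgm := hg m (List.mem_cons_self)
    have hgs : ∀ m' ∈ ms, goodM m' := fun m' hm' => hg m' (List.mem_cons_of_mem _ hm')
    have hkle : fIdx m b ≤ b.length := fIdx_le m b
    simp only [List.foldl_cons]
    by_cases hkb : fIdx m b < b.length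
    · have hlen' : (b.take (fIdx m b)).length = fIdx m b := by simp [hkle]
      have hnl : b[fIdx m b]'hkb = '\n' := by
        obtain ⟨hne, hhead, -⟩ := hgm
        obtain ⟨c, t, rfl⟩ := List.exists_cons_of_ne_nil hne
        have hp := List.isPrefixOf_iff_prefix.mp (fIdx_prefixOf hkb)
        have h0 : (0 : Nat) < (c :: t).length := by simp
        have := hp.getElem h0
        rw [List.getElem_drop] at this
        simp only [List.getElem_cons_zero] at this
        simp only [Nat.add_zero] at this
        rw [← this]
        simpa using hhead
      rw [ih (b.take (fIdx m b)) hgs, hlen',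
        foldl_min_take_congr hkb hnl ms (fIdx m b) le_rfl hgs,
        List.take_take, min_eq_left (minfold_le _ ms (fIdx m b)), min_eq_right hkle]
    · have hkeq : fIdx m b = b.length := by omega
      rw [hkeq, List.take_length, ih b hgs, min_self]

theorem condfold {bl : List Char} :
    ∀ (ms : List (List Char)) (n : Nat), (∀ m ∈ ms, goodM m) → n ≤ bl.length →
      ms.foldl (fun n m => min n (fIdx m bl)) n
        = ms.foldl (fun n m => if PySem.Chars.isIn m bl then min n (fIdx m bl) else n) n := by
  intro ms
  induction ms with
  | nil => intro n _ _; rfl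
  | cons m ms ih =>
    intro n hg hn
    have hgm := hg m (List.mem_cons_self)
    have hgs : ∀ m' ∈ ms, goodM m' := fun m' hm' => hg m' (List.mem_cons_of_mem _ hm')
    simp only [List.foldl_cons]
    by_cases hin : PySem.Chars.isIn m bl = true
    · rw [if_pos hin]
      exact ih _ hgs (le_trans (min_le_left _ _) hn)
    · have : fIdx m bl = bl.length := by
        have h1 := fIdx_le m bl
        have h2 : ¬ fIdx m bl < bl.length := fun h => hin ((isIn_iff_fIdx bl hgm.1).mpr h)
        omega
      rw [if_neg hin, this, min_eq_left hn]
      exact ih _ hgs hn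

theorem castfold (y : Nat) (u : List Nat) :
    List.foldl min ((y : Int)) (u.map (Nat.cast : Nat → Int)) = ((u.foldl min y : Nat) : Int) := by
  induction u generalizing y with
  | nil => rfl
  | cons z u ih =>
    simp only [List.map_cons, List.foldl_cons]
    rw [← Nat.cast_min, ih]

theorem pvMarkers_good : ∀ m ∈ pvMarkers, goodM m := by
  intro m hm
  fin_cases hm <;> exact ⟨by decide, by decide, by decide⟩

-- the central fact: A's sequential cut equals B's one-slice-at-min cut
theorem cut_eq (bl : List Char) :
    pvMarkers.foldl
        (fun b m => if PySem.Chars.isIn m b then (PySem.Chars.splitOn b m).headD [] else b) bl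
      = (match PySem.List.min? ((pvMarkers.filter (fun m => PySem.Chars.isIn m bl)).map
            (fun m => PySem.Chars.find bl m)) (fun x => x) with
          | none => bl
          | some p => PySem.List.slice bl none (some p)) := by
  have hA : pvMarkers.foldl
      (fun b m => if PySem.Chars.isIn m b then (PySem.Chars.splitOn b m).headD [] else b) bl
      = pvMarkers.foldl (fun b m => b.take (fIdx m b)) bl := by
    apply PySem.List.foldl_congr_mem
    intro b m hm
    have hgm := pvMarkers_good m hm
    by_cases hin : PySem.Chars.isIn m b = true
    · rw [if_pos hin, splitOn_headD b hgm.1]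
    · have : fIdx m b = b.length := by
        have h1 := fIdx_le m b
        have h2 : ¬ fIdx m b < b.length := fun h => hin ((isIn_iff_fIdx b hgm.1).mpr h)
        omega
      rw [if_neg hin, this, List.take_length]
  have hpos : (pvMarkers.filter (fun m => PySem.Chars.isIn m bl)).map
      (fun m => PySem.Chars.find bl m)
      = ((pvMarkers.filter (fun m => PySem.Chars.isIn m bl)).map (fun m => fIdx m bl)).map
          (Nat.cast : Nat → Int) := by
    rw [List.map_map]
    apply List.map_congr_left
    intro m hm
    have hmem := List.mem_of_mem_filter hm
    have hin := List.of_mem_filter hm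
    have hgm := pvMarkers_good m hmem
    simp only [Function.comp]
    rw [find_eq bl hgm.1, if_pos ((isIn_iff_fIdx bl hgm.1).mp hin)]
  have hN : pvMarkers.foldl (fun n m => min n (fIdx m bl)) bl.length
      = ((pvMarkers.filter (fun m => PySem.Chars.isIn m bl)).map (fun m => fIdx m bl)).foldl
          min bl.length := by
    rw [condfold pvMarkers bl.length pvMarkers_good le_rfl,
      PySem.List.foldl_if_eq_foldl_filter (fun m => PySem.Chars.isIn m bl)
        (fun n m => min n (fIdx m bl)) pvMarkers bl.length, List.foldl_map]
  rw [hA, seqcut_eq pvMarkers bl pvMarkers_good, hpos, hN]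
  have hle : ∀ z ∈ (pvMarkers.filter (fun m => PySem.Chars.isIn m bl)).map
      (fun m => fIdx m bl), z ≤ bl.length := by
    intro z hz
    obtain ⟨m, -, rfl⟩ := List.mem_map.mp hz
    exact fIdx_le m bl
  cases hP : (pvMarkers.filter (fun m => PySem.Chars.isIn m bl)).map (fun m => fIdx m bl) with
  | nil =>
    simp only [List.map_nil, List.foldl_nil]
    rw [(PySem.List.min?_eq_none_iff ([] : List Int) (fun x : Int => x)).mpr rfl]
    exact List.take_length
  | cons y u =>
    have hy : y ≤ bl.length := hle y (by rw [hP]; exact List.mem_cons_self)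
    rw [List.map_cons, PySem.List.min?_id_cons]
    show List.take _ bl = PySem.List.slice bl none (some (List.foldl min ((y : Nat) : Int) (u.map (Nat.cast : Nat → Int))))
    rw [castfold, PySem.List.slice_to bl (Int.natCast_nonneg _), Int.toNat_natCast,
      List.foldl_cons, min_eq_right hy]

-- ===== VERDICT (by name: the statement is the Claim_ definition above) =====
theorem extract_guess_text_spec : Claim_equal_extract_guess_text := by
  intro body _
  unfold Spec_extract_guess_text extract_guess_text extract_guess_text_alt
  by_cases hb : body = ""
  · simp [hb]
  · simp only [if_neg hb]
    rw [cut_eq body.toList]
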